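-- pv_equiv track=rewrite | github.com/Hippo-work/Python-work | Bitops/example_lrs.py | geffe_generator
-- ===== SOURCE A (Python) =====
-- def lfsr(seed, taps, reg_size=8):
--     sr = seed
--     while True:
--         feedback = 0
--         for t in taps:
--             feedback ^= (sr >> t) & 1
--         output = sr & 1
--         sr = (sr >> 1) | (feedback << (reg_size - 1))
--         yield output
--
-- def geffe_generator(s1_seed, s2_seed, s3_seed, taps1, taps2, taps3, n_bits):
--     lfsr1 = lfsr(s1_seed, taps1)
--     lfsr2 = lfsr(s2_seed, taps2)
--     lfsr3 = lfsr(s3_seed, taps3)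
--     output = []
--
--     for _ in range(n_bits):
--         x = next(lfsr1)
--         y = next(lfsr2)
--         s = next(lfsr3)
--         # Geffe combining function: (s AND x) XOR ((NOT s) AND y)
--         z = (s & x) ^ ((~s & 1) & y)
--         output.append(z)
--
--     return output
-- ===== SOURCE B (Python) =====
-- def geffe_generator(s1_seed, s2_seed, s3_seed, taps1, taps2, taps3, n_bits):
--     def run(seed, taps, reg_size=8):
--         sr = seed
--         bits = []
--         for _ in range(n_bits):
--             bits.append(sr & 1)
--             feedback = 0
--             for t in taps:
--                 feedback ^= (sr >> t) & 1
--             sr = (sr >> 1) | (feedback << (reg_size - 1))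
--         return bits
--     xs = run(s1_seed, taps1)
--     ys = run(s2_seed, taps2)
--     ss = run(s3_seed, taps3)
--     return [x if s else y for x, y, s in zip(xs, ys, ss)]
-- ===== Notes on version B (the rewrite author's own statement) =====
-- stated objective: alternative
-- what changed: Replaces the three lockstep LFSR generator coroutines with three independent full-stream generation passes followed by one combining pass that multiplexes z = x if s else y over the zipped streams.
import Mathlib
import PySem

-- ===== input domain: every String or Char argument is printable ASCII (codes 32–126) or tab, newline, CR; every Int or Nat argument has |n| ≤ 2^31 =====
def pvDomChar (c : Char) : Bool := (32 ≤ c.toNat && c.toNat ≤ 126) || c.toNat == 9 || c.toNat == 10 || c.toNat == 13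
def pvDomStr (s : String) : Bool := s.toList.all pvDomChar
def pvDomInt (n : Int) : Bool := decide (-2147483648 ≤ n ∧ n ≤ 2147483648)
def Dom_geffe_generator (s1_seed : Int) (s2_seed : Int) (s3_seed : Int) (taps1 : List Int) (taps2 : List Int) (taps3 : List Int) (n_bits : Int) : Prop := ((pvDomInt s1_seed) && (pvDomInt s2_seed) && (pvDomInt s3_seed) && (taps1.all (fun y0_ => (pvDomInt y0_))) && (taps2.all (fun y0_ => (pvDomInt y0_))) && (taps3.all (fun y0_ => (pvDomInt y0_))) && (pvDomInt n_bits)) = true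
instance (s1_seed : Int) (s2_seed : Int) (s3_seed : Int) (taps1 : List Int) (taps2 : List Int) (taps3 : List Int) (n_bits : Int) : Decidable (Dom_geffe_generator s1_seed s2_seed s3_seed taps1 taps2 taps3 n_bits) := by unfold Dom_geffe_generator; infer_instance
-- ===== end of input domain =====

-- B replaces A's three lockstep LFSR coroutines by three independent full-stream passes
-- plus one combining (multiplexer) pass over the zipped streams; objective: alternative decomposition.

-- ===== PORT A =====
-- one step of the lfsr generator body: feedback = XOR of tapped bits, then
-- sr = (sr >> 1) | (feedback << (reg_size - 1)); reg_size is the default 8, so the shift is 7.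
def pvLfsrStep (sr : Int) (taps : List Int) : Int :=
  let feedback := taps.foldl (fun fb t => PySem.Int.bxor fb (PySem.Int.band (sr >>> t.toNat) 1)) 0
  PySem.Int.bor (sr >>> 1) (feedback <<< 7)

-- A's `for _ in range(n_bits)` loop, advancing all three registers in lockstep and appending z.
def pvGeffeLoopA (n : Nat) (sr1 sr2 sr3 : Int) (t1 t2 t3 : List Int) (acc : List Int) : List Int :=
  match n with
  | 0 => acc
  | Nat.succ m =>
    let x := PySem.Int.band sr1 1
    let y := PySem.Int.band sr2 1
    let s := PySem.Int.band sr3 1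
    let z := PySem.Int.bxor (PySem.Int.band s x) (PySem.Int.band (PySem.Int.band (Int.not s) 1) y)
    pvGeffeLoopA m (pvLfsrStep sr1 t1) (pvLfsrStep sr2 t2) (pvLfsrStep sr3 t3) t1 t2 t3 (acc ++ [z])

def geffe_generator (s1_seed : Int) (s2_seed : Int) (s3_seed : Int) (taps1 : List Int) (taps2 : List Int) (taps3 : List Int) (n_bits : Int) : List Int :=
  pvGeffeLoopA n_bits.toNat s1_seed s2_seed s3_seed taps1 taps2 taps3 []

-- ===== PORT B =====
-- Source B's `run`: generate one LFSR's full output stream of n bits.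
def pvRun (n : Nat) (sr : Int) (taps : List Int) (acc : List Int) : List Int :=
  match n with
  | 0 => acc
  | Nat.succ m => pvRun m (pvLfsrStep sr taps) taps (acc ++ [PySem.Int.band sr 1])

-- Source B's combining comprehension over zip(xs, ys, ss): z = x if s else y.
def pvCombine (xs ys ss : List Int) : List Int :=
  (xs.zip (ys.zip ss)).map (fun p => if p.2.2 ≠ 0 then p.1 else p.2.1)

def geffe_generator_alt (s1_seed : Int) (s2_seed : Int) (s3_seed : Int) (taps1 : List Int) (taps2 : List Int) (taps3 : List Int) (n_bits : Int) : List Int :=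
  pvCombine (pvRun n_bits.toNat s1_seed taps1 []) (pvRun n_bits.toNat s2_seed taps2 []) (pvRun n_bits.toNat s3_seed taps3 [])

-- ===== PRECONDITION & SPEC =====
-- Pre_ excludes exactly the inputs where A raises: a negative tap makes `sr >> t` raise
-- ValueError on the first generated bit (only reached when n_bits > 0). B raises there too.
def Pre_geffe_generator (s1_seed : Int) (s2_seed : Int) (s3_seed : Int) (taps1 : List Int) (taps2 : List Int) (taps3 : List Int) (n_bits : Int) : Prop :=
  n_bits ≤ 0 ∨ ((∀ t ∈ taps1, 0 ≤ t) ∧ (∀ t ∈ taps2, 0 ≤ t) ∧ (∀ t ∈ taps3, 0 ≤ t))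
instance (s1_seed : Int) (s2_seed : Int) (s3_seed : Int) (taps1 : List Int) (taps2 : List Int) (taps3 : List Int) (n_bits : Int) : Decidable (Pre_geffe_generator s1_seed s2_seed s3_seed taps1 taps2 taps3 n_bits) := by unfold Pre_geffe_generator; infer_instance

def pvWitness_geffe_generator : Int × Int × Int × List Int × List Int × List Int × Int :=
  (137, 66, 23, [0, 2], [0, 3], [0, 1, 2], 8)

def Spec_geffe_generator (s1_seed : Int) (s2_seed : Int) (s3_seed : Int) (taps1 : List Int) (taps2 : List Int) (taps3 : List Int) (n_bits : Int) (out : List Int) : Prop := out = geffe_generator_alt s1_seed s2_seed s3_seed taps1 taps2 taps3 n_bits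
instance (s1_seed : Int) (s2_seed : Int) (s3_seed : Int) (taps1 : List Int) (taps2 : List Int) (taps3 : List Int) (n_bits : Int) (out : List Int) : Decidable (Spec_geffe_generator s1_seed s2_seed s3_seed taps1 taps2 taps3 n_bits out) := by unfold Spec_geffe_generator; infer_instance

-- ===== CLAIM (what is proved, stated in full; the proofs are below) =====
def Claim_equal_geffe_generator : Prop := ∀ (s1_seed : Int) (s2_seed : Int) (s3_seed : Int) (taps1 : List Int) (taps2 : List Int) (taps3 : List Int) (n_bits : Int), Dom_geffe_generator s1_seed s2_seed s3_seed taps1 taps2 taps3 n_bits → Pre_geffe_generator s1_seed s2_seed s3_seed taps1 taps2 taps3 n_bits → Spec_geffe_generator s1_seed s2_seed s3_seed taps1 taps2 taps3 n_bits (geffe_generator s1_seed s2_seed s3_seed taps1 taps2 taps3 n_bits)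

-- ===== LEMMAS AND PROOFS =====

theorem pvWitness_ok :
    Dom_geffe_generator pvWitness_geffe_generator.1 pvWitness_geffe_generator.2.1 pvWitness_geffe_generator.2.2.1 pvWitness_geffe_generator.2.2.2.1 pvWitness_geffe_generator.2.2.2.2.1 pvWitness_geffe_generator.2.2.2.2.2.1 pvWitness_geffe_generator.2.2.2.2.2.2 ∧
    Pre_geffe_generator pvWitness_geffe_generator.1 pvWitness_geffe_generator.2.1 pvWitness_geffe_generator.2.2.1 pvWitness_geffe_generator.2.2.2.1 pvWitness_geffe_generator.2.2.2.2.1 pvWitness_geffe_generator.2.2.2.2.2.1 pvWitness_geffe_generator.2.2.2.2.2.2 := by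
  constructor <;> decide

theorem band_one_cases (a : Int) : PySem.Int.band a 1 = 0 ∨ PySem.Int.band a 1 = 1 := by
  rw [PySem.Int.band_one]
  have h1 := PySem.Int.mod_nonneg a (b := 2) (by omega)
  have h2 := PySem.Int.mod_lt a (b := 2) (by omega)
  omega

-- the Geffe combining function equals the multiplexer on 0/1-valued bits
theorem combine_mux (sr1 sr2 sr3 : Int) :
    PySem.Int.bxor (PySem.Int.band (PySem.Int.band sr3 1) (PySem.Int.band sr1 1))
      (PySem.Int.band (PySem.Int.band (Int.not (PySem.Int.band sr3 1)) 1) (PySem.Int.band sr2 1))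
    = if PySem.Int.band sr3 1 ≠ 0 then PySem.Int.band sr1 1 else PySem.Int.band sr2 1 := by
  rcases band_one_cases sr1 with h1 | h1 <;>
  rcases band_one_cases sr2 with h2 | h2 <;>
  rcases band_one_cases sr3 with h3 | h3 <;>
  rw [h1, h2, h3] <;> decide

theorem pvRun_append (n : Nat) (sr : Int) (taps : List Int) (a b : List Int) :
    pvRun n sr taps (a ++ b) = a ++ pvRun n sr taps b := by
  induction n generalizing sr a b with
  | zero => simp [pvRun]
  | succ m ih =>
      rw [pvRun, pvRun, List.append_assoc, ih]

theorem pvRun_cons (m : Nat) (sr : Int) (taps : List Int) :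
    pvRun (Nat.succ m) sr taps [] = PySem.Int.band sr 1 :: pvRun m (pvLfsrStep sr taps) taps [] := by
  rw [pvRun, show ([] : List Int) ++ [PySem.Int.band sr 1] = [PySem.Int.band sr 1] ++ [] by simp,
    pvRun_append]
  simp

theorem pvCombine_cons (x y s : Int) (xs ys ss : List Int) :
    pvCombine (x :: xs) (y :: ys) (s :: ss)
    = (if s ≠ 0 then x else y) :: pvCombine xs ys ss := by
  simp [pvCombine]

theorem pvGeffeLoopA_eq (n : Nat) (t1 t2 t3 : List Int) :
    ∀ (sr1 sr2 sr3 : Int) (acc : List Int),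
      pvGeffeLoopA n sr1 sr2 sr3 t1 t2 t3 acc
      = acc ++ pvCombine (pvRun n sr1 t1 []) (pvRun n sr2 t2 []) (pvRun n sr3 t3 []) := by
  induction n with
  | zero => intro sr1 sr2 sr3 acc; simp [pvGeffeLoopA, pvRun, pvCombine]
  | succ m ih =>
      intro sr1 sr2 sr3 acc
      rw [pvGeffeLoopA, ih, pvRun_cons, pvRun_cons, pvRun_cons, pvCombine_cons, combine_mux]
      simp

-- ===== VERDICT (by name: the statement is the Claim_ definition above) =====
theorem geffe_generator_spec : Claim_equal_geffe_generator := by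
  intro s1 s2 s3 t1 t2 t3 n _ _
  unfold Spec_geffe_generator geffe_generator geffe_generator_alt
  rw [pvGeffeLoopA_eq]
  simp
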